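-- pv_equiv track=rewrite | github.com/arrowlimo/arrow-limo | scripts/audit_vendor_standardization.py | is_internal_transfer
-- ===== SOURCE A (Python) =====
-- INTERNAL_TRANSFER_PATTERNS = [
--     'TRANSFER TO 8362',
--     'TRANSFER FROM 8362',
--     'TRANSFER TO 903990106011',
--     'TRANSFER FROM 903990106011',
--     'INTER ACCOUNT TRANSFER',
--     'INTERAC TRANSFER',
--     'E-TRANSFER',
--     'ETRANSFER',
--     'ELECTRONIC FUNDS TRANSFER'
-- ]
--
-- def is_internal_transfer(vendor):
--     """Check if vendor is an internal transfer that should be excluded."""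
--     if not vendor:
--         return False
--     vendor_upper = vendor.upper()
--     for pattern in INTERNAL_TRANSFER_PATTERNS:
--         if pattern in vendor_upper:
--             return True
--     return False
-- ===== SOURCE B (Python) =====
-- INTERNAL_TRANSFER_PATTERNS = [
--     'TRANSFER TO 8362',
--     'TRANSFER FROM 8362',
--     'TRANSFER TO 903990106011',
--     'TRANSFER FROM 903990106011',
--     'INTER ACCOUNT TRANSFER',
--     'INTERAC TRANSFER',
--     'E-TRANSFER',
--     'ETRANSFER',
--     'ELECTRONIC FUNDS TRANSFER'
-- ]
--
-- def is_internal_transfer(vendor):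
--     """Check if vendor is an internal transfer that should be excluded."""
--     if not vendor:
--         return False
--     tail = vendor.upper()
--     # single left-to-right scan: at each position test all patterns simultaneously
--     while tail:
--         if any(tail.startswith(p) for p in INTERNAL_TRANSFER_PATTERNS):
--             return True
--         tail = tail[1:]
--     return False
-- ===== Notes on version B (the rewrite author's own statement) =====
-- stated objective: alternative
-- what changed: Replaces nine independent per-pattern substring searches over the uppercased vendor by one left-to-right positional scan of the string that tests all patterns simultaneously at each position (naive multi-pattern matcher).
import Mathlib
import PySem

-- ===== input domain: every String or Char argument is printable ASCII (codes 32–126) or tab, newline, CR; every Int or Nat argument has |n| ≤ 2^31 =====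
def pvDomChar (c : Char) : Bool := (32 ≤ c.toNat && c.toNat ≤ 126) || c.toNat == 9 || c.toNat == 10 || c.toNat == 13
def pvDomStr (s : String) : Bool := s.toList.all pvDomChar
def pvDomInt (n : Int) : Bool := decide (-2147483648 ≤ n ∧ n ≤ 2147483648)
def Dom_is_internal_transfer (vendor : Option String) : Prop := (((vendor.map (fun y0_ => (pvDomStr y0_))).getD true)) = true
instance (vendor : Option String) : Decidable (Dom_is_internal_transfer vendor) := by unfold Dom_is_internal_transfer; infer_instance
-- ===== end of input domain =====

-- B replaces A's nine independent substring searches by one left-to-right positional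
-- scan testing all patterns simultaneously (alternative algorithm, same asymptotic cost).


def INTERNAL_TRANSFER_PATTERNS : List String :=
  [ "TRANSFER TO 8362",
    "TRANSFER FROM 8362",
    "TRANSFER TO 903990106011",
    "TRANSFER FROM 903990106011",
    "INTER ACCOUNT TRANSFER",
    "INTERAC TRANSFER",
    "E-TRANSFER",
    "ETRANSFER",
    "ELECTRONIC FUNDS TRANSFER" ]

-- ===== PORT A =====
-- 'for pattern in …: if pattern in vendor_upper: return True' is the any-fold below.
def is_internal_transfer (vendor : Option String) : Bool :=
  match vendor with
  | none => false
  | some v =>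
    if v = "" then false
    else
      let vendor_upper := PySem.Str.upper v
      INTERNAL_TRANSFER_PATTERNS.any (fun pattern => PySem.Str.isIn pattern vendor_upper)

-- ===== PORT B =====
-- Source B's 'while tail: … tail = tail[1:]' loop as structural recursion on the char list.
def pvScan : List Char → Bool
  | [] => false
  | c :: cs =>
    if INTERNAL_TRANSFER_PATTERNS.any (fun p => PySem.Chars.startswith (c :: cs) p.toList)
    then true else pvScan cs

def is_internal_transfer_alt (vendor : Option String) : Bool :=
  match vendor with
  | none => false
  | some v =>
    if v = "" then false
    else pvScan (PySem.Chars.upper v.toList)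

-- ===== PRECONDITION & SPEC =====
def Spec_is_internal_transfer (vendor : Option String) (out : Bool) : Prop := out = is_internal_transfer_alt vendor
instance (vendor : Option String) (out : Bool) : Decidable (Spec_is_internal_transfer vendor out) := by unfold Spec_is_internal_transfer; infer_instance

-- ===== CLAIM (what is proved, stated in full; the proofs are below) =====
def Claim_equal_is_internal_transfer : Prop := ∀ (vendor : Option String), Dom_is_internal_transfer vendor → Spec_is_internal_transfer vendor (is_internal_transfer vendor)

-- ===== LEMMAS AND PROOFS =====

-- the positional scan finds a pattern iff some pattern is an infix (A's per-pattern test)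
theorem pvScan_eq (cs : List Char) :
    pvScan cs = INTERNAL_TRANSFER_PATTERNS.any (fun p => PySem.Chars.isIn p.toList cs) := by
  induction cs with
  | nil => decide
  | cons c cs ih =>
    simp only [pvScan]
    split_ifs with h
    · rw [Bool.eq_iff_iff]
      simp only [true_iff]
      rw [List.any_eq_true] at h ⊢
      obtain ⟨p, hp, hpre⟩ := h
      rw [PySem.Chars.startswith_iff] at hpre
      exact ⟨p, hp, (PySem.Chars.isIn_iff_infix _ _).2 hpre.isInfix⟩
    · rw [ih, Bool.eq_iff_iff, List.any_eq_true, List.any_eq_true]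
      rw [List.any_eq_true] at h
      push Not at h
      constructor
      · rintro ⟨p, hp, hin⟩
        rw [PySem.Chars.isIn_iff_infix] at hin
        exact ⟨p, hp, (PySem.Chars.isIn_iff_infix _ _).2 (List.infix_cons hin)⟩
      · rintro ⟨p, hp, hin⟩
        rw [PySem.Chars.isIn_iff_infix] at hin
        rcases List.infix_cons_iff.1 hin with hpre | hinf
        · exact absurd ((PySem.Chars.startswith_iff _ _).2 hpre) (h p hp)
        · exact ⟨p, hp, (PySem.Chars.isIn_iff_infix _ _).2 hinf⟩

-- ===== VERDICT (by name: the statement is the Claim_ definition above) =====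
theorem is_internal_transfer_spec : Claim_equal_is_internal_transfer := by
  intro vendor _
  unfold Spec_is_internal_transfer is_internal_transfer is_internal_transfer_alt
  cases vendor with
  | none => rfl
  | some v =>
    by_cases h : v = ""
    · simp [h]
    · simp only [h, if_false]
      rw [pvScan_eq]
      simp [PySem.Str.isIn]
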